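-- pv_equiv track=rewrite | github.com/alexander-po-marketing/description-generator | src/faq_renderer.py | _sort_faqs_by_order
-- ===== SOURCE A (Python) =====
-- from typing import Dict, Iterable, List, Mapping, Sequence
--
-- FAQ_ORDER: Mapping[str, Sequence[str]] = {
--     "technical": (
--         "basic_use",
--         "primary_indications",
--         "therapeutic_class",
--         "mechanism_of_action",
--         "safety_toxicity",
--         "formulation_handling",
--         "stability_concerns",
--         "small_molecule",
--     ),
--     "regulatory": ("regions_approved", "regulatory_patent", "patent_expiry"),
--     "sourcing": (
--         "sourcing",
--         "sourcing_documents",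
--         "manufacturers",
--         "producing_countries",
--         "supplier_count",
--         "gmp_certifications",
--         "gmp_audit",
--         "typical_moq",
--         "quote_requests",
--     ),
--     "pharmaoffer": ("smart_sourcing", "pro_data", "market_report"),
-- }
--
-- def _sort_faqs_by_order(faqs: Sequence[Mapping[str, object]], group: str) -> List[Mapping[str, object]]:
--     order = {faq_id: index for index, faq_id in enumerate(FAQ_ORDER.get(group, ()))}
--     return sorted(
--         faqs,
--         key=lambda item: (
--             order.get(str(item.get("id")), len(order)),
--             str(item.get("question", "")),
--         ),
--     )
-- ===== SOURCE B (Python) =====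
-- from typing import Dict, Iterable, List, Mapping, Sequence
--
-- # FAQ_ORDER is module DATA shared verbatim with the original; the algorithm below differs.
-- FAQ_ORDER: Mapping[str, Sequence[str]] = {
--     "technical": ("basic_use", "primary_indications", "therapeutic_class", "mechanism_of_action", "safety_toxicity", "formulation_handling", "stability_concerns", "small_molecule"),
--     "regulatory": ("regions_approved", "regulatory_patent", "patent_expiry"),
--     "sourcing": ("sourcing", "sourcing_documents", "manufacturers", "producing_countries", "supplier_count", "gmp_certifications", "gmp_audit", "typical_moq", "quote_requests"),
--     "pharmaoffer": ("smart_sourcing", "pro_data", "market_report"),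
-- }
--
-- def _sort_faqs_by_order(faqs: Sequence[Mapping[str, object]], group: str) -> List[Mapping[str, object]]:
--     # Sort once by question only (stable), then emit the group's ids in their
--     # predefined order, each picking its (question-ordered) items; leftovers last.
--     ids = FAQ_ORDER.get(group, ())
--     by_q = sorted(faqs, key=lambda item: str(item.get("question", "")))
--     known = [item for fid in ids for item in by_q if str(item.get("id")) == fid]
--     unknown = [item for item in by_q if str(item.get("id")) not in ids]
--     return known + unknown
-- ===== Notes on version B (the rewrite author's own statement) =====
-- stated objective: alternative
-- what changed: Instead of building a rank dict and doing one sort with a composite (rank, question) key, B sorts once by question only and then emits buckets: for each id in the group's predefined order it picks that id's question-sorted items, leftovers (unknown ids) come last in question order; correct because a stable sort by the secondary key followed by a stable grouping on the primary key equals the stable composite-key sort.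
import Mathlib
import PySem

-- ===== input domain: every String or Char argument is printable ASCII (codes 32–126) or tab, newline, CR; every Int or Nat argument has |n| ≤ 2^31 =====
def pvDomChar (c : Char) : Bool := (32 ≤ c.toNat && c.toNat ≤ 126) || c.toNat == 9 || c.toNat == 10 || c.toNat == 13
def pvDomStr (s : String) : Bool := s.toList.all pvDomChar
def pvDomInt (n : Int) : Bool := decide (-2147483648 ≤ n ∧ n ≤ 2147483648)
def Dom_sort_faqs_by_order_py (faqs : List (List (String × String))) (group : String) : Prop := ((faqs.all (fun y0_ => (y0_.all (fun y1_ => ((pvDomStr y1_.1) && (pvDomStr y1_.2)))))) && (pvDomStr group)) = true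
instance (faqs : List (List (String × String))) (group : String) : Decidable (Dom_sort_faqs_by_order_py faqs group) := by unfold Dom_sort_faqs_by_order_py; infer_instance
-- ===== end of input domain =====

-- B replaces A's single composite-key (rank, question) sort by: one stable sort by question
-- only, then buckets emitted in the group's predefined id order, leftovers last (alternative
-- decomposition, same cost). (Neither program mutates the input list.)


-- ===== PORT A =====
-- module constant FAQ_ORDER (shared by both Pythons verbatim)
def pvFAQ_ORDER : PySem.Dict String (List String) := PySem.Dict.mk
  [ ("technical", ["basic_use", "primary_indications", "therapeutic_class", "mechanism_of_action",
                   "safety_toxicity", "formulation_handling", "stability_concerns", "small_molecule"]),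
    ("regulatory", ["regions_approved", "regulatory_patent", "patent_expiry"]),
    ("sourcing", ["sourcing", "sourcing_documents", "manufacturers", "producing_countries",
                  "supplier_count", "gmp_certifications", "gmp_audit", "typical_moq", "quote_requests"]),
    ("pharmaoffer", ["smart_sourcing", "pro_data", "market_report"]) ]

-- A: order = {faq_id: index for index, faq_id in enumerate(FAQ_ORDER.get(group, ()))}
def pvBuildOrder (group : String) : PySem.Dict String Int :=
  (PySem.List.enumerate (pvFAQ_ORDER.getD group [])).foldl (fun d p => d.insert p.2 p.1) PySem.Dict.empty

-- str(item.get("id")): first-match lookup; a missing key is None, str(None) = "None"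
def pvStrId (item : List (String × String)) : String := (List.lookup "id" item).getD "None"
-- str(item.get("question", ""))
def pvQuestion (item : List (String × String)) : String := (List.lookup "question" item).getD ""

def sort_faqs_by_order_py (faqs : List (List (String × String))) (group : String) : List (List (String × String)) :=
  let order := pvBuildOrder group
  PySem.List.sorted2 faqs
    (fun item => order.getD (pvStrId item) (order.size : Int))
    (fun item => pvQuestion item)

-- ===== PORT B =====
def sort_faqs_by_order_py_alt (faqs : List (List (String × String))) (group : String) : List (List (String × String)) :=
  -- ids = FAQ_ORDER.get(group, ())
  let ids := pvFAQ_ORDER.getD group []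
  -- by_q = sorted(faqs, key=lambda item: str(item.get("question", "")))
  let by_q := PySem.List.sorted faqs (fun item => pvQuestion item)
  -- known = [item for fid in ids for item in by_q if str(item.get("id")) == fid]
  let known := ids.flatMap (fun fid => by_q.filter (fun item => pvStrId item == fid))
  -- unknown = [item for item in by_q if str(item.get("id")) not in ids]
  let unknown := by_q.filter (fun item => !ids.contains (pvStrId item))
  known ++ unknown

-- ===== PRECONDITION & SPEC =====
def Spec_sort_faqs_by_order_py (faqs : List (List (String × String))) (group : String) (out : List (List (String × String))) : Prop := out = sort_faqs_by_order_py_alt faqs group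
instance (faqs : List (List (String × String))) (group : String) (out : List (List (String × String))) : Decidable (Spec_sort_faqs_by_order_py faqs group out) := by unfold Spec_sort_faqs_by_order_py; infer_instance

-- ===== CLAIM (what is proved, stated in full; the proofs are below) =====
def Claim_equal_sort_faqs_by_order_py : Prop := ∀ (faqs : List (List (String × String))) (group : String), Dom_sort_faqs_by_order_py faqs group → Spec_sort_faqs_by_order_py faqs group (sort_faqs_by_order_py faqs group)

-- ===== LEMMAS AND PROOFS =====

-- inserting an element that sorts before everything in B lands at the boundary A/B
theorem insertBy_append_all_true {α : Type} (b : α → α → Bool) (x : α) (A B : List α)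
    (h : ∀ y ∈ B, b x y = true) :
    PySem.List.insertBy b x (A ++ B) = PySem.List.insertBy b x A ++ B := by
  induction A with
  | nil =>
    cases B with
    | nil => simp [PySem.List.insertBy]
    | cons y ys => simp [PySem.List.insertBy, h y (by simp)]
  | cons a A ih =>
    simp only [List.cons_append, PySem.List.insertBy]
    split <;> simp [ih]

theorem insertBy_append_all_false {α : Type} (b : α → α → Bool) (x : α) (A B : List α)
    (h : ∀ y ∈ A, b x y = false) :
    PySem.List.insertBy b x (A ++ B) = A ++ PySem.List.insertBy b x B := by
  induction A with
  | nil => simp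
  | cons a A ih =>
    simp only [List.cons_append, PySem.List.insertBy, h a (by simp)]
    simp only [Bool.false_eq_true, if_false, List.cons.injEq, true_and]
    exact ih (fun y hy => h y (by simp [hy]))

theorem insertBy_congr {α : Type} (b b' : α → α → Bool) (x : α) (ys : List α)
    (h : ∀ y ∈ ys, b x y = b' x y) :
    PySem.List.insertBy b x ys = PySem.List.insertBy b' x ys := by
  induction ys with
  | nil => rfl
  | cons y ys ih =>
    simp only [PySem.List.insertBy, h y (by simp)]
    split <;> simp [ih (fun z hz => h z (by simp [hz]))]

theorem foldl_insertBy_congr {α : Type} (b b' : α → α → Bool) :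
    ∀ (xs acc : List α), (∀ x ∈ xs, ∀ y ∈ acc, b x y = b' x y) →
      (∀ x ∈ xs, ∀ y ∈ xs, b x y = b' x y) →
      xs.foldl (fun a x => PySem.List.insertBy b x a) acc
        = xs.foldl (fun a x => PySem.List.insertBy b' x a) acc := by
  intro xs
  induction xs with
  | nil => intro acc _ _; rfl
  | cons x xs ih =>
    intro acc hacc hxs
    simp only [List.foldl_cons]
    rw [insertBy_congr b b' x acc (fun y hy => hacc x (by simp) y hy)]
    refine ih (PySem.List.insertBy b' x acc) ?_ ?_
    · intro z hz y hy
      rcases (PySem.List.mem_insertBy _ _ _ _).mp hy with h | h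
      · subst h; exact hxs z (by simp [hz]) y (by simp)
      · exact hacc z (by simp [hz]) y h
    · intro z hz y hy; exact hxs z (by simp [hz]) y (by simp [hy])

-- a stable insertion sort of a list whose elements split into a "low" class (p) strictly below
-- the "high" class (¬p) is the sort of the lows followed by the sort of the highs
theorem foldl_insertBy_split {α : Type} (b : α → α → Bool) (p : α → Bool) :
    ∀ (xs K U : List α),
      (∀ x ∈ xs, ∀ y ∈ xs, p x = true → p y = false → b x y = true) →
      (∀ x ∈ xs, ∀ y ∈ xs, p x = false → p y = true → b x y = false) →
      (∀ x ∈ xs, ∀ y ∈ U, p x = true → b x y = true) →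
      (∀ x ∈ xs, ∀ y ∈ K, p x = false → b x y = false) →
      (∀ k ∈ K, p k = true) → (∀ u ∈ U, p u = false) →
      xs.foldl (fun a x => PySem.List.insertBy b x a) (K ++ U)
        = (xs.filter p).foldl (fun a x => PySem.List.insertBy b x a) K
          ++ (xs.filter (fun x => !p x)).foldl (fun a x => PySem.List.insertBy b x a) U := by
  intro xs
  induction xs with
  | nil => intro K U _ _ _ _ _ _; simp
  | cons x0 xs ih =>
    intro K U hxs1 hxs2 hU1 hK1 hK hU
    by_cases hp : p x0 = true
    · simp only [List.foldl_cons, List.filter_cons, hp, if_true, Bool.not_true]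
      rw [insertBy_append_all_true b x0 K U (fun y hy => hU1 x0 (by simp) y hy hp)]
      have := ih (PySem.List.insertBy b x0 K) U
        (fun a ha y hy => hxs1 a (by simp [ha]) y (by simp [hy]))
        (fun a ha y hy => hxs2 a (by simp [ha]) y (by simp [hy]))
        (fun a ha y hy => hU1 a (by simp [ha]) y hy)
        (fun a ha y hy hpa => by
          rcases (PySem.List.mem_insertBy _ _ _ _).mp hy with h | h
          · rw [h]; exact hxs2 a (by simp [ha]) x0 (by simp) hpa hp
          · exact hK1 a (by simp [ha]) y h hpa)
        (fun k hk => by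
          rcases (PySem.List.mem_insertBy _ _ _ _).mp hk with h | h
          · rw [h]; exact hp
          · exact hK k h) hU
      simpa using this
    · have hp' : p x0 = false := by simpa using hp
      simp only [List.foldl_cons, List.filter_cons, hp', Bool.false_eq_true, if_false,
        Bool.not_eq_eq_eq_not, Bool.not_true]
      rw [insertBy_append_all_false b x0 K U (fun y hy => hK1 x0 (by simp) y hy hp')]
      have := ih K (PySem.List.insertBy b x0 U)
        (fun a ha y hy => hxs1 a (by simp [ha]) y (by simp [hy]))
        (fun a ha y hy => hxs2 a (by simp [ha]) y (by simp [hy]))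
        (fun a ha y hy hpa => by
          rcases (PySem.List.mem_insertBy _ _ _ _).mp hy with h | h
          · rw [h]; exact hxs1 a (by simp [ha]) x0 (by simp) hpa hp'
          · exact hU1 a (by simp [ha]) y h hpa)
        (fun a ha y hy => hK1 a (by simp [ha]) y hy)
        hK
        (fun u hu => by
          rcases (PySem.List.mem_insertBy _ _ _ _).mp hu with h | h
          · rw [h]; exact hp'
          · exact hU u h)
      simpa using this

-- STABILITY DECOMPOSITION: a stable sort by the composite key (k1, k2), all k1 values lying in a
-- strictly increasing list vs, is the concatenation over vs of the k2-sorts of the k1-buckets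
theorem sorted2_bucket {α : Type} (k1 : α → Int) (k2 : α → String) :
    ∀ (vs : List Int) (xs : List α), vs.Pairwise (· < ·) → (∀ x ∈ xs, k1 x ∈ vs) →
      PySem.List.sorted2 xs k1 k2 false
        = vs.flatMap (fun v => PySem.List.sorted (xs.filter (fun x => k1 x == v)) k2 false) := by
  intro vs
  induction vs with
  | nil =>
    intro xs _ h
    have hxs : xs = [] := by
      cases xs with
      | nil => rfl
      | cons a t => exact absurd (h a (by simp)) (by simp)
    subst hxs; rfl
  | cons v vs ih =>
    intro xs hpw h
    have hv : ∀ w ∈ vs, v < w := fun w hw => List.rel_of_pairwise_cons hpw hw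
    have hmemvs : ∀ x ∈ xs, (k1 x == v) = false → k1 x ∈ vs := by
      intro x hx hne
      rcases List.mem_cons.mp (h x hx) with h' | h'
      · exact absurd (beq_iff_eq.mpr h') (by simp [hne])
      · exact h'
    have hsplit := foldl_insertBy_split
      (fun a b => decide (k1 a < k1 b) || (!decide (k1 b < k1 a) && decide (k2 a < k2 b)))
      (fun x => k1 x == v) xs [] []
      (by
        intro x hx y hy hpx hpy
        have hx' : k1 x = v := beq_iff_eq.mp hpx
        have hy' : v < k1 y := hv _ (hmemvs y hy hpy)
        simp only [Bool.or_eq_true, decide_eq_true_eq]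
        left; omega)
      (by
        intro x hx y hy hpx hpy
        have hy' : k1 y = v := beq_iff_eq.mp hpy
        have hx' : v < k1 x := hv _ (hmemvs x hx hpx)
        simp only [Bool.or_eq_false_iff, Bool.and_eq_false_iff, Bool.not_eq_false',
          decide_eq_true_eq, decide_eq_false_iff_not, not_lt]
        exact ⟨by omega, Or.inl (by omega)⟩)
      (by intro x _ y hy; simp at hy) (by intro x _ y hy; simp at hy)
      (by simp) (by simp)
    simp only [List.append_nil] at hsplit
    rw [show PySem.List.sorted2 xs k1 k2 false
          = xs.foldl (fun a x => PySem.List.insertBy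
              (fun a b => decide (k1 a < k1 b) || (!decide (k1 b < k1 a) && decide (k2 a < k2 b)))
              x a) [] from rfl]
    rw [hsplit, List.flatMap_cons]
    congr 1
    · -- bucket v: on the bucket the comparator is the k2 comparator
      rw [show PySem.List.sorted (xs.filter (fun x => k1 x == v)) k2 false
            = (xs.filter (fun x => k1 x == v)).foldl
                (fun a x => PySem.List.insertBy (fun a b => decide (k2 a < k2 b)) x a) [] from rfl]
      refine foldl_insertBy_congr _ _ _ [] (by simp) ?_
      intro x hx y hy
      have hx' : k1 x = v := by have := List.of_mem_filter hx; simpa using this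
      have hy' : k1 y = v := by have := List.of_mem_filter hy; simpa using this
      simp [hx', hy']
    · -- remaining buckets: recurse on vs
      rw [show (xs.filter (fun x => !(k1 x == v))).foldl
              (fun a x => PySem.List.insertBy
                (fun a b => decide (k1 a < k1 b) || (!decide (k1 b < k1 a) && decide (k2 a < k2 b)))
                x a) []
            = PySem.List.sorted2 (xs.filter (fun x => !(k1 x == v))) k1 k2 false from rfl]
      rw [ih _ (hpw.of_cons) (by
        intro x hx
        exact hmemvs x (List.mem_of_mem_filter hx) (by simpa using List.of_mem_filter hx))]
      refine List.flatMap_congr ?_ -- placeholder, fixed below if name differs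
      intro w hw
      rw [List.filter_filter]
      congr 1
      refine List.filter_congr ?_
      intro x _
      have hwv : w ≠ v := by have := hv w hw; omega
      by_cases hxw : k1 x = w
      · simp [hxw, hwv]
      · simp [beq_iff_eq, hxw]

-- insertion by key preserves key-sortedness
theorem pairwise_insertBy {α : Type} (key : α → String) (x : α) (ys : List α)
    (h : ys.Pairwise (fun a b => key a ≤ key b)) :
    (PySem.List.insertBy (fun a b => decide (key a < key b)) x ys).Pairwise
      (fun a b => key a ≤ key b) := by
  induction ys with
  | nil => simp [PySem.List.insertBy]
  | cons y ys ih =>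
    simp only [PySem.List.insertBy]
    by_cases hb : key x < key y
    · simp only [decide_eq_true hb, if_true]
      refine List.Pairwise.cons ?_ h
      intro z hz
      rcases List.mem_cons.mp hz with hz | hz
      · rw [hz]; exact le_of_lt hb
      · exact le_trans (le_of_lt hb) (List.rel_of_pairwise_cons h hz)
    · simp only [decide_eq_false hb, Bool.false_eq_true, if_false]
      refine List.Pairwise.cons ?_ (ih h.of_cons)
      intro z hz
      rcases (PySem.List.mem_insertBy _ _ _ _).mp hz with hz | hz
      · subst hz; exact le_of_not_gt hb
      · exact List.rel_of_pairwise_cons h hz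

-- filtering commutes with inserting into a key-sorted list
theorem filter_insertBy {α : Type} (key : α → String) (p : α → Bool) (x : α) (ys : List α)
    (h : ys.Pairwise (fun a b => key a ≤ key b)) :
    (PySem.List.insertBy (fun a b => decide (key a < key b)) x ys).filter p
      = if p x then PySem.List.insertBy (fun a b => decide (key a < key b)) x (ys.filter p)
        else ys.filter p := by
  induction ys with
  | nil => cases hp : p x <;> simp [PySem.List.insertBy, hp]
  | cons y ys ih =>
    simp only [PySem.List.insertBy]
    by_cases hb : key x < key y
    · simp only [decide_eq_true hb, if_true]
      have hall : ∀ z ∈ (y :: ys).filter p, decide (key x < key z) = true := by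
        intro z hz
        rcases List.mem_cons.mp (List.mem_of_mem_filter hz) with hz' | hz'
        · rw [hz']; simp [hb]
        · exact decide_eq_true (lt_of_lt_of_le hb (List.rel_of_pairwise_cons h hz'))
      cases hp : p x with
      | true =>
        rw [List.filter_cons_of_pos hp]
        have := insertBy_append_all_true (fun a b => decide (key a < key b)) x []
          ((y :: ys).filter p) hall
        simpa [PySem.List.insertBy] using this.symm
      | false => rw [List.filter_cons_of_neg (by simp [hp])]; simp
    · simp only [decide_eq_false hb, Bool.false_eq_true, if_false]
      cases hpy : p y with
      | true =>
        rw [List.filter_cons_of_pos hpy, List.filter_cons_of_pos hpy]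
        simp only [PySem.List.insertBy, decide_eq_false hb, Bool.false_eq_true, if_false]
        rw [ih h.of_cons]
        split <;> rfl
      | false =>
        rw [List.filter_cons_of_neg (by simp [hpy]), List.filter_cons_of_neg (by simp [hpy])]
        rw [ih h.of_cons]

theorem filter_foldl_insertBy {α : Type} (key : α → String) (p : α → Bool) :
    ∀ (xs acc : List α), acc.Pairwise (fun a b => key a ≤ key b) →
      (xs.foldl (fun a x => PySem.List.insertBy (fun a b => decide (key a < key b)) x a) acc).filter p
        = (xs.filter p).foldl
            (fun a x => PySem.List.insertBy (fun a b => decide (key a < key b)) x a) (acc.filter p) := by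
  intro xs
  induction xs with
  | nil => intro acc _; rfl
  | cons x xs ih =>
    intro acc hacc
    simp only [List.foldl_cons, List.filter_cons]
    rw [ih _ (pairwise_insertBy key x acc hacc), filter_insertBy key p x acc hacc]
    cases hp : p x <;> simp

-- filtering commutes with a stable key sort
theorem filter_sorted {α : Type} (key : α → String) (p : α → Bool) (xs : List α) :
    (PySem.List.sorted xs key false).filter p = PySem.List.sorted (xs.filter p) key false := by
  rw [PySem.List.sorted_eq_foldl_insertBy, PySem.List.sorted_eq_foldl_insertBy]
  simpa using filter_foldl_insertBy key p xs []  List.Pairwise.nil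

-- emitting buckets indexed 0..len-1 is emitting them element by element
theorem flatMap_range_getD {α β : Type} [Inhabited α] (g : α → List β) :
    ∀ L : List α, (List.range L.length).flatMap (fun i => g (L.getD i default)) = L.flatMap g := by
  intro L
  induction L with
  | nil => simp
  | cons a t ih =>
    rw [List.length_cons, List.range_succ_eq_map, List.flatMap_cons, List.flatMap_map,
      List.flatMap_cons]
    simp only [List.getD_cons_zero, List.getD_cons_succ]
    rw [ih]

-- every list FAQ_ORDER.get(group, ()) can produce has distinct ids
theorem faq_order_nodup (g : String) : (pvFAQ_ORDER.getD g []).Nodup := by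
  simp only [pvFAQ_ORDER, PySem.Dict.getD_eq_get?_getD, PySem.Dict.get?_mk_cons]
  split_ifs <;> first | decide | simp [PySem.Dict.get?]

-- the order dict is exactly the (id, index) pairs of the enumeration
theorem buildOrder_items (g : String) :
    (pvBuildOrder g).items
      = (PySem.List.enumerate (pvFAQ_ORDER.getD g [])).map (fun p => (p.2, p.1)) := by
  unfold pvBuildOrder
  have h := PySem.Dict.items_foldl_insert_fresh
    (l := PySem.List.enumerate (pvFAQ_ORDER.getD g []))
    (k := fun p => p.2) (v := fun p => p.1) (d := PySem.Dict.empty)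
    (by intro a _; simp [PySem.Dict.contains_empty])
    (by rw [PySem.List.map_snd_enumerate]; exact faq_order_nodup g)
  simpa [PySem.Dict.items] using h

theorem buildOrder_keys (g : String) : (pvBuildOrder g).keys = pvFAQ_ORDER.getD g [] := by
  show (pvBuildOrder g).items.map (·.1) = _
  rw [buildOrder_items, List.map_map]
  exact PySem.List.map_snd_enumerate _ _

theorem buildOrder_size (g : String) : (pvBuildOrder g).size = (pvFAQ_ORDER.getD g []).length := by
  simp only [PySem.Dict.size, buildOrder_items, List.length_map, PySem.List.length_enumerate]

theorem buildOrder_get?_iff (g : String) (s : String) (v : Int) :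
    (pvBuildOrder g).get? s = some v
      ↔ ∃ (k : Nat) (h : k < (pvFAQ_ORDER.getD g []).length),
          v = (k : Int) ∧ s = (pvFAQ_ORDER.getD g [])[k] := by
  constructor
  · intro hm
    have hmem := PySem.Dict.mem_items_of_get?_eq_some _ hm
    rw [buildOrder_items] at hmem
    rcases List.mem_map.mp hmem with ⟨p, hp, hpe⟩
    rcases (PySem.List.mem_enumerate_iff _ _ _).mp hp with ⟨k, hk, rfl⟩
    refine ⟨k, hk, ?_, ?_⟩
    · cases hpe; simp
    · cases hpe; simp
  · rintro ⟨k, hk, rfl, rfl⟩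
    have hmem : ((pvFAQ_ORDER.getD g [])[k], (k : Int)) ∈ (pvBuildOrder g).items := by
      rw [buildOrder_items]
      refine List.mem_map.mpr ⟨((k : Int), (pvFAQ_ORDER.getD g [])[k]), ?_, by simp⟩
      exact (PySem.List.mem_enumerate_iff _ _ _).mpr ⟨k, hk, by simp⟩
    exact PySem.Dict.get?_of_mem_items _ hmem (by rw [buildOrder_keys]; exact faq_order_nodup g)

theorem buildOrder_contains (g : String) (s : String) :
    (pvBuildOrder g).contains s = (pvFAQ_ORDER.getD g []).contains s := by
  rw [PySem.Dict.contains_eq_decide_mem_keys, buildOrder_keys]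
  simp

-- the composite key A uses: rank of the id, or len(order) when the id is unknown
theorem buildOrder_rank_eq_iff (g : String) (s : String) (i : Nat)
    (hi : i < (pvFAQ_ORDER.getD g []).length) :
    ((pvBuildOrder g).getD s ((pvBuildOrder g).size : Int) = (i : Int))
      ↔ s = (pvFAQ_ORDER.getD g [])[i] := by
  constructor
  · intro hEq
    cases hc : (pvBuildOrder g).get? s with
    | none =>
      rw [PySem.Dict.getD_eq_get?_getD (pvBuildOrder g), hc, Option.getD_none, buildOrder_size] at hEq
      omega
    | some w =>
      rw [PySem.Dict.getD_eq_get?_getD (pvBuildOrder g), hc, Option.getD_some] at hEq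
      subst hEq
      rcases (buildOrder_get?_iff g s _).mp hc with ⟨k, hk, hki, rfl⟩
      have : k = i := by omega
      subst this; rfl
  · intro hs
    have : (pvBuildOrder g).get? s = some (i : Int) :=
      (buildOrder_get?_iff g s _).mpr ⟨i, hi, rfl, hs⟩
    rw [PySem.Dict.getD_eq_get?_getD (pvBuildOrder g), this, Option.getD_some]

theorem buildOrder_rank_eq_size_iff (g : String) (s : String) :
    ((pvBuildOrder g).getD s ((pvBuildOrder g).size : Int)
        = ((pvFAQ_ORDER.getD g []).length : Int))
      ↔ (pvFAQ_ORDER.getD g []).contains s = false := by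
  rw [← buildOrder_contains]
  cases hc : (pvBuildOrder g).get? s with
  | none =>
    rw [PySem.Dict.getD_eq_get?_getD (pvBuildOrder g), hc, Option.getD_none, buildOrder_size,
      PySem.Dict.contains_eq_isSome_get?, hc]
    simp
  | some w =>
    rw [PySem.Dict.getD_eq_get?_getD (pvBuildOrder g), hc, Option.getD_some,
      PySem.Dict.contains_eq_isSome_get?, hc]
    rcases (buildOrder_get?_iff g s _).mp hc with ⟨k, hk, rfl, _⟩
    simp; omega

theorem buildOrder_rank_mem (g : String) (s : String) :
    ∃ k : Nat, k < (pvFAQ_ORDER.getD g []).length + 1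
      ∧ (pvBuildOrder g).getD s ((pvBuildOrder g).size : Int) = (k : Int) := by
  cases hc : (pvBuildOrder g).get? s with
  | none =>
    refine ⟨(pvFAQ_ORDER.getD g []).length, by omega, ?_⟩
    rw [PySem.Dict.getD_eq_get?_getD (pvBuildOrder g), hc, Option.getD_none, buildOrder_size]
  | some w =>
    rcases (buildOrder_get?_iff g s _).mp hc with ⟨k, hk, rfl, _⟩
    refine ⟨k, by omega, ?_⟩
    rw [PySem.Dict.getD_eq_get?_getD (pvBuildOrder g), hc, Option.getD_some]

-- ===== VERDICT (by name: the statement is the Claim_ definition above) =====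
theorem sort_faqs_by_order_py_spec : Claim_equal_sort_faqs_by_order_py := by
  intro faqs group _
  unfold Spec_sort_faqs_by_order_py sort_faqs_by_order_py sort_faqs_by_order_py_alt
  set L := pvFAQ_ORDER.getD group [] with hL
  set order := pvBuildOrder group with horder
  set kA : List (String × String) → Int :=
    fun item => order.getD (pvStrId item) ((order.size : Int)) with hkA
  -- A = buckets over the possible rank values 0 .. len(L)
  have hpwvs : ((List.range (L.length + 1)).map (fun i : Nat => (i : Int))).Pairwise (· < ·) := by
    refine List.Pairwise.map _ ?_ List.pairwise_lt_range
    intro a b hab; exact_mod_cast hab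
  have hmemvs : ∀ x ∈ faqs, kA x ∈ (List.range (L.length + 1)).map (fun i : Nat => (i : Int)) := by
    intro x _
    rcases buildOrder_rank_mem group (pvStrId x) with ⟨k, hk, hkeq⟩
    exact List.mem_map.mpr ⟨k, List.mem_range.mpr hk, hkeq.symm⟩
  rw [sorted2_bucket kA (fun item => pvQuestion item)
      ((List.range (L.length + 1)).map (fun i : Nat => (i : Int))) faqs hpwvs hmemvs]
  rw [List.flatMap_map, List.range_succ, List.flatMap_append, List.flatMap_cons,
    List.flatMap_nil, List.append_nil]
  congr 1
  · -- known buckets, rank i ↦ id L[i]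
    refine Eq.trans (List.flatMap_congr ?_)
      (flatMap_range_getD (fun fid =>
        (PySem.List.sorted faqs (fun item => pvQuestion item)).filter
          (fun item => pvStrId item == fid)) L)
    intro i hi
    have hi' : i < L.length := List.mem_range.mp hi
    have hpt : ∀ x ∈ faqs, (kA x == ((i : Nat) : Int)) = (pvStrId x == L.getD i default) := by
      intro x _
      rw [List.getD_eq_getElem L default hi']
      by_cases hxe : pvStrId x = L[i]
      · have h1 : kA x = (i : Int) :=
          (buildOrder_rank_eq_iff group (pvStrId x) i hi').mpr hxe
        simp [h1, hxe]
      · have h1 : kA x ≠ (i : Int) :=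
          fun hcon => hxe ((buildOrder_rank_eq_iff group (pvStrId x) i hi').mp hcon)
        simp [hxe, h1]
    rw [filter_sorted, List.filter_congr hpt]
  · -- unknown bucket
    have hpt : ∀ x ∈ faqs, (kA x == (L.length : Int)) = (!L.contains (pvStrId x)) := by
      intro x _
      cases hc : L.contains (pvStrId x) with
      | true =>
        have h1 : kA x ≠ (L.length : Int) := fun hcon => by
          have h2 := (buildOrder_rank_eq_size_iff group (pvStrId x)).mp hcon
          rw [hc] at h2
          exact absurd h2 (by simp)
        simp [h1]
      | false =>
        have h1 : kA x = (L.length : Int) :=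
          (buildOrder_rank_eq_size_iff group (pvStrId x)).mpr hc
        simp [h1]
    rw [filter_sorted, List.filter_congr hpt]
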